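-- pv_equiv track=rewrite | github.com/octavia-crompton/russian-river-seepage | scripts/seepage_analysis.py | find_patches
-- ===== SOURCE A (Python) =====
-- def find_patches(nums):
--     """
--     identify closures by duration
--     """
--     if not nums:
--         return {}
--
--     patches = {}
--     in_patch = False
--     start_index = -1
--
--     for i, num in enumerate(nums):
--         if num == 1 and not in_patch:
--             start_index = i
--             patches[start_index] = 1
--             in_patch = True
--         elif num == 1 and in_patch:
--             patches[start_index] += 1
--         elif num == 0 and in_patch:
--             in_patch = False
--
--     # Sort patches by length in descending order and return as a dictionary
--     sorted_patches = {k: v for k, v in sorted(patches.items(), key=lambda item: item[1], reverse=True)}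
--
--     return sorted_patches
-- ===== SOURCE B (Python) =====
-- def find_patches(nums):
--     """
--     identify closures by duration
--     """
--     patches = {}
--     cur = []
--     for i, x in enumerate(nums + [0]):
--         if x == 0:
--             ones = cur.count(1)
--             if ones:
--                 patches[i - len(cur) + cur.index(1)] = ones
--             cur = []
--         else:
--             cur.append(x)
--     return dict(sorted(patches.items(), key=lambda item: item[1], reverse=True))
-- ===== Notes on version B (the rewrite author's own statement) =====
-- stated objective: alternative
-- what changed: Replaces A's in_patch/start_index flag machinery with dict-value increments by a single pass over nums with a sentinel zero appended, buffering each zero-separated segment and recording its first-1 index and 1-count at flush time; the final stable sort by count descending is kept.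
import Mathlib
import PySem

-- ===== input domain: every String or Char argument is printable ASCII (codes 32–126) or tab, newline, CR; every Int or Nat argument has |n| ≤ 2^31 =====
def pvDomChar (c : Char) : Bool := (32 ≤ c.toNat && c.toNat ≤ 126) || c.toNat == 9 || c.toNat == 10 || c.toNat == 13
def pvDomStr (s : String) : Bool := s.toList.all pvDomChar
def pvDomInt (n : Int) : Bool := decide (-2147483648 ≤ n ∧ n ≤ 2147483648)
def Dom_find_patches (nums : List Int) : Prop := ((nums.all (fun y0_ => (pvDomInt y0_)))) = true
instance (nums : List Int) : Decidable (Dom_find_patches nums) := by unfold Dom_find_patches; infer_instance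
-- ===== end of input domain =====

-- B replaces A's in_patch/start_index flag machinery by a one-pass segment buffer flushed
-- at each zero (sentinel-closed), computing each run's first-1 index and 1-count per segment
-- (objective: alternative decomposition, same cost).

-- ===== PORT A =====
-- A's for-loop over enumerate(nums) as structural recursion on the remaining list,
-- carrying (index i, patches, in_patch, start_index).
-- `patches[start_index] += 1` is `modify start 0 (·+1)`: exact here because whenever
-- in_patch is true, start_index is a key of patches (no KeyError possible).
def loopA : List Int → Int → PySem.Dict Int Int → Bool → Int → PySem.Dict Int Int
  | [], _, patches, _, _ => patches
  | num :: rest, i, patches, in_patch, start =>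
    if num == 1 && !in_patch then
      loopA rest (i + 1) (patches.insert i 1) true i
    else if num == 1 && in_patch then
      loopA rest (i + 1) (patches.modify start 0 (· + 1)) in_patch start
    else if num == 0 && in_patch then
      loopA rest (i + 1) patches false start
    else
      loopA rest (i + 1) patches in_patch start

def find_patches (nums : List Int) : List (Int × Int) :=
  if nums = [] then []
  else
    let patches := loopA nums 0 PySem.Dict.empty false (-1)
    (PySem.Dict.ofList (PySem.List.sorted patches.items (fun item => item.2) true)).items

-- ===== PORT B =====
-- Source B's loop over enumerate(nums + [0]) carrying (index i, patches, cur).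
-- `cur.index(1)` is guarded by `ones ≠ 0` in Source B, so `.getD 0` is never the default.
def loopB : List Int → Int → PySem.Dict Int Int → List Int → PySem.Dict Int Int
  | [], _, patches, _ => patches
  | x :: rest, i, patches, cur =>
    if x == 0 then
      let ones : Int := (PySem.List.count cur 1 : Int)
      let patches' := if ones ≠ 0 then
          patches.insert (i - (cur.length : Int) + (((PySem.List.index? cur 1).getD 0 : Nat) : Int)) ones
        else patches
      loopB rest (i + 1) patches' []
    else
      loopB rest (i + 1) patches (cur ++ [x])

def find_patches_alt (nums : List Int) : List (Int × Int) :=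
  let patches := loopB (nums ++ [0]) 0 PySem.Dict.empty []
  (PySem.Dict.ofList (PySem.List.sorted patches.items (fun item => item.2) true)).items

-- ===== PRECONDITION & SPEC =====
def Spec_find_patches (nums : List Int) (out : List (Int × Int)) : Prop := out = find_patches_alt nums
instance (nums : List Int) (out : List (Int × Int)) : Decidable (Spec_find_patches nums out) := by unfold Spec_find_patches; infer_instance

-- ===== CLAIM (what is proved, stated in full; the proofs are below) =====
def Claim_equal_find_patches : Prop := ∀ (nums : List Int), Dom_find_patches nums → Spec_find_patches nums (find_patches nums)

-- ===== LEMMAS AND PROOFS =====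

-- the key B records for a segment `cur` starting at absolute index `i - cur.length`
def segKey (i : Int) (cur : List Int) : Int :=
  i - (cur.length : Int) + (((PySem.List.index? cur 1).getD 0 : Nat) : Int)

theorem contains_eq_false_of_fresh (d : List (Int × Int)) (k : Int)
    (h : ∀ p ∈ d, p.1 ≠ k) : (PySem.Dict.mk d).contains k = false := by
  rw [PySem.Dict.contains_mk]
  simp only [List.any_eq_false]
  intro p hp
  simpa using h p hp

theorem insert_fresh (d : List (Int × Int)) (k : Int) (v : Int)
    (h : ∀ p ∈ d, p.1 ≠ k) :
    (PySem.Dict.mk d).insert k v = PySem.Dict.mk (d ++ [(k, v)]) := by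
  simp [PySem.Dict.insert, contains_eq_false_of_fresh d k h]

theorem find_last (d : List (Int × Int)) (k : Int) (c : Int)
    (h : ∀ p ∈ d, p.1 ≠ k) :
    List.find? (fun p => p.1 == k) (d ++ [(k, c)]) = some (k, c) := by
  induction d with
  | nil => simp
  | cons p rest ih =>
    have h1 : p.1 ≠ k := h p (by simp)
    rw [List.cons_append, List.find?_cons_of_neg (by simpa using h1)]
    exact ih (fun q hq => h q (by simp [hq]))

theorem getD_last (d : List (Int × Int)) (k : Int) (c dflt : Int)
    (h : ∀ p ∈ d, p.1 ≠ k) :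
    (PySem.Dict.mk (d ++ [(k, c)])).getD k dflt = c := by
  simp [PySem.Dict.getD, PySem.Dict.get?, find_last d k c h]

theorem map_id_of_fresh (d : List (Int × Int)) (k : Int) (v : Int × Int)
    (h : ∀ p ∈ d, p.1 ≠ k) :
    List.map (fun p => if (p.1 == k) = true then v else p) d = d := by
  induction d with
  | nil => rfl
  | cons p rest ih =>
    have h1 : p.1 ≠ k := h p (by simp)
    simp only [List.map_cons]
    rw [if_neg (by simpa using h1)]
    rw [ih (fun q hq => h q (by simp [hq]))]

theorem modify_last (d : List (Int × Int)) (k : Int) (c : Int) (f : Int → Int)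
    (h : ∀ p ∈ d, p.1 ≠ k) :
    (PySem.Dict.mk (d ++ [(k, c)])).modify k 0 f = PySem.Dict.mk (d ++ [(k, f c)]) := by
  have hc : (PySem.Dict.mk (d ++ [(k, c)])).contains k = true := by
    rw [PySem.Dict.contains_mk]
    simp [List.any_append]
  rw [PySem.Dict.modify, getD_last d k c 0 h, PySem.Dict.insert, if_pos hc]
  apply congrArg PySem.Dict.mk
  show List.map (fun p => if (p.1 == k) = true then (k, f c) else p) (d ++ [(k, c)]) = _
  rw [List.map_append, map_id_of_fresh d k (k, f c) h]
  simp

theorem idx1_lt_length (cur : List Int) (h : 1 ∈ cur) :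
    ((PySem.List.index? cur 1).getD 0 : Nat) < cur.length := by
  simp only [PySem.List.index?]
  rcases Option.isSome_iff_exists.mp (List.isSome_idxOf?.mpr h) with ⟨n, hn⟩
  have := (List.idxOf?_eq_some_iff.mp hn).fst
  simp [hn, this]

theorem idx1_append_of_mem (cur : List Int) (x : Int) (h : 1 ∈ cur) :
    PySem.List.index? (cur ++ [x]) 1 = PySem.List.index? cur 1 := by
  simp only [PySem.List.index?]
  rcases Option.isSome_iff_exists.mp (List.isSome_idxOf?.mpr h) with ⟨n, hn⟩
  obtain ⟨hlt, hget, hmin⟩ := List.idxOf?_eq_some_iff.mp hn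
  rw [hn]
  apply List.idxOf?_eq_some_iff.mpr
  refine ⟨by simp; omega, ?_, ?_⟩
  · rw [List.getElem_append_left hlt]; exact hget
  · intro j hj
    rw [List.getElem_append_left (by omega)]
    exact hmin j hj

theorem idx1_append_of_not_mem (cur : List Int) (h : 1 ∉ cur) :
    PySem.List.index? (cur ++ [(1:Int)]) 1 = some cur.length := by
  simp only [PySem.List.index?]
  apply List.idxOf?_eq_some_iff.mpr
  refine ⟨by simp, by simp, ?_⟩
  intro j hj
  rw [List.getElem_append_left (by omega)]
  exact fun hc => h (hc ▸ List.getElem_mem _)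

theorem count_append_one (cur : List Int) (x : Int) :
    PySem.List.count (cur ++ [x]) 1 = PySem.List.count cur 1 + (if x = 1 then 1 else 0) := by
  simp only [PySem.List.count, List.count_append]
  congr 1
  by_cases h : x = 1 <;> simp [h]

theorem count_pos_iff_mem (cur : List Int) : PySem.List.count cur 1 ≠ 0 ↔ 1 ∈ cur := by
  rw [PySem.List.count, ← List.count_pos_iff]
  omega

-- main invariant: B's pending segment buffer corresponds to A's (in_patch, start_index, dict) state
theorem loop_eq (rest : List Int) : ∀ (i : Int) (d : List (Int × Int)) (cur : List Int) (start : Int),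
    (∀ p ∈ d, p.1 < i - (cur.length : Int)) →
    loopB (rest ++ [0]) i (PySem.Dict.mk d) cur =
      (if 1 ∈ cur then
        loopA rest i (PySem.Dict.mk (d ++ [(segKey i cur, (PySem.List.count cur 1 : Int))])) true (segKey i cur)
      else loopA rest i (PySem.Dict.mk d) false start) := by
  induction rest with
  | nil =>
    intro i d cur start hb
    by_cases h1 : 1 ∈ cur
    · have hk : ∀ p ∈ d, p.1 ≠ segKey i cur := by
        intro p hp
        have := hb p hp
        unfold segKey
        omega
      have hcnt : (PySem.List.count cur 1 : Int) ≠ 0 := by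
        have := (count_pos_iff_mem cur).mpr h1
        exact_mod_cast Nat.cast_ne_zero.mpr this
      simp only [List.nil_append, loopB, loopA]
      rw [if_pos (by decide : ((0:Int) == 0) = true)]
      unfold segKey at hk ⊢
      rw [if_pos hcnt, insert_fresh d _ _ hk, if_pos h1]
    · have hcnt : (PySem.List.count cur 1 : Int) = 0 := by
        have : PySem.List.count cur 1 = 0 := by
          by_contra hc; exact h1 ((count_pos_iff_mem cur).mp hc)
        exact_mod_cast this
      simp only [List.nil_append, loopB, loopA]
      rw [if_pos (by decide : ((0:Int) == 0) = true), if_neg (by simpa using hcnt), if_neg h1]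
  | cons num rest' ih =>
    intro i d cur start hb
    by_cases h0 : num = 0
    · subst h0
      by_cases h1 : 1 ∈ cur
      · have hk : ∀ p ∈ d, p.1 ≠ segKey i cur := by
          intro p hp; have := hb p hp; unfold segKey; omega
        have hcnt : (PySem.List.count cur 1 : Int) ≠ 0 := by
          have := (count_pos_iff_mem cur).mpr h1
          exact_mod_cast Nat.cast_ne_zero.mpr this
        have hidx := idx1_lt_length cur h1
        have hb' : ∀ p ∈ d ++ [(segKey i cur, (PySem.List.count cur 1 : Int))],
            p.1 < (i + 1) - (([] : List Int).length : Int) := by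
          intro p hp
          rcases List.mem_append.mp hp with hp | hp
          · have := hb p hp; simp; omega
          · simp only [List.mem_singleton] at hp; subst hp
            unfold segKey
            simp only [PySem.List.index?] at hidx ⊢
            simp
            omega
        have hrec := ih (i + 1) (d ++ [(segKey i cur, (PySem.List.count cur 1 : Int))]) [] (segKey i cur) hb'
        rw [if_neg (by decide : ¬ (1:Int) ∈ ([] : List Int))] at hrec
        simp only [List.cons_append, loopB, loopA]
        rw [if_pos (by decide : ((0:Int) == 0) = true), if_pos h1,
          if_neg (by decide : ¬ ((0:Int) == 1 && !true) = true),
          if_neg (by decide : ¬ ((0:Int) == 1 && true) = true),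
          if_pos (by decide : ((0:Int) == 0 && true) = true)]
        unfold segKey at hk hrec ⊢
        rw [if_pos hcnt, insert_fresh d _ _ hk]
        exact hrec
      · have hcnt : (PySem.List.count cur 1 : Int) = 0 := by
          have : PySem.List.count cur 1 = 0 := by
            by_contra hc; exact h1 ((count_pos_iff_mem cur).mp hc)
          exact_mod_cast this
        have hb' : ∀ p ∈ d, p.1 < (i + 1) - (([] : List Int).length : Int) := by
          intro p hp; have := hb p hp; simp; omega
        have hrec := ih (i + 1) d [] start hb'
        rw [if_neg (by decide : ¬ (1:Int) ∈ ([] : List Int))] at hrec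
        simp only [List.cons_append, loopB, loopA]
        rw [if_pos (by decide : ((0:Int) == 0) = true), if_neg h1,
          if_neg (by decide : ¬ ((0:Int) == 1 && !false) = true),
          if_neg (by decide : ¬ ((0:Int) == 1 && false) = true),
          if_neg (by decide : ¬ ((0:Int) == 0 && false) = true),
          if_neg (not_not_intro hcnt)]
        exact hrec
    · -- num ≠ 0 : B pushes num onto cur
      have hb' : ∀ p ∈ d, p.1 < (i + 1) - (((cur ++ [num]).length : Nat) : Int) := by
        intro p hp; have := hb p hp; simp; omega
      have ihc := ih (i + 1) d (cur ++ [num]) start hb'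
      by_cases hnum1 : num = 1
      · subst hnum1
        have hmem : (1:Int) ∈ cur ++ [(1:Int)] := by simp
        rw [if_pos hmem] at ihc
        by_cases h1 : 1 ∈ cur
        · -- continuing a patch: A increments via modify
          have hk : ∀ p ∈ d, p.1 ≠ segKey i cur := by
            intro p hp; have := hb p hp; unfold segKey; omega
          have hkey : segKey (i + 1) (cur ++ [1]) = segKey i cur := by
            unfold segKey
            rw [idx1_append_of_mem cur 1 h1]
            simp only [List.length_append, List.length_singleton]
            push_cast
            ring
          have hcount : (PySem.List.count (cur ++ [1]) 1 : Int)
              = (PySem.List.count cur 1 : Int) + 1 := by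
            rw [count_append_one]; simp
          rw [hkey, hcount] at ihc
          simp only [List.cons_append, loopB, loopA]
          rw [if_neg (by decide : ¬ ((1:Int) == 0) = true), if_pos h1,
            if_neg (by decide : ¬ ((1:Int) == 1 && !true) = true),
            if_pos (by decide : ((1:Int) == 1 && true) = true)]
          unfold segKey at ihc hk ⊢
          rw [ihc, modify_last d _ _ _ hk]
        · -- entering a patch: A inserts (i, 1)
          have hkey : segKey (i + 1) (cur ++ [1]) = i := by
            unfold segKey
            rw [idx1_append_of_not_mem cur h1]
            simp only [Option.getD_some, List.length_append, List.length_singleton]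
            push_cast
            ring
          have hcount : (PySem.List.count (cur ++ [1]) 1 : Int) = 1 := by
            have h0c : PySem.List.count cur 1 = 0 := by
              by_contra hc; exact h1 ((count_pos_iff_mem cur).mp hc)
            rw [count_append_one, h0c]
            simp
          have hk : ∀ p ∈ d, p.1 ≠ i := by
            intro p hp; have := hb p hp; simp at this ⊢; omega
          rw [hkey, hcount] at ihc
          simp only [List.cons_append, loopB, loopA]
          rw [if_neg (by decide : ¬ ((1:Int) == 0) = true), if_neg h1,
            if_pos (by decide : ((1:Int) == 1 && !false) = true)]
          rw [ihc, insert_fresh d _ _ hk]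
      · -- num ∉ {0, 1}: both sides carry state through
        have hne1 : ¬ (num == (1:Int)) = true := by simpa using hnum1
        have hne0 : ¬ (num == (0:Int)) = true := by simpa using h0
        have hmem : (1:Int) ∈ cur ++ [num] ↔ (1:Int) ∈ cur := by
          constructor
          · intro hc
            rcases List.mem_append.mp hc with hc | hc
            · exact hc
            · simp at hc; exact absurd hc.symm hnum1
          · intro hc; exact List.mem_append.mpr (Or.inl hc)
        by_cases h1 : 1 ∈ cur
        · have hkey : segKey (i + 1) (cur ++ [num]) = segKey i cur := by
            unfold segKey
            rw [idx1_append_of_mem cur num h1]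
            simp only [List.length_append, List.length_singleton]
            push_cast
            ring
          have hcount : PySem.List.count (cur ++ [num]) 1 = PySem.List.count cur 1 := by
            rw [count_append_one]; simp [hnum1]
          rw [if_pos (hmem.mpr h1), hkey, hcount] at ihc
          simp only [List.cons_append, loopB, loopA]
          rw [if_neg hne0, if_pos h1,
            if_neg (show ¬ ((num == 1 && !true) = true) by simp),
            if_neg (show ¬ ((num == 1 && true) = true) by simp [hne1]),
            if_neg (show ¬ ((num == 0 && true) = true) by simp [hne0])]
          unfold segKey at ihc ⊢
          exact ihc
        · rw [if_neg (fun hc => h1 (hmem.mp hc))] at ihc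
          simp only [List.cons_append, loopB, loopA]
          rw [if_neg hne0, if_neg h1,
            if_neg (show ¬ ((num == 1 && !false) = true) by simp [hne1]),
            if_neg (show ¬ ((num == 1 && false) = true) by simp),
            if_neg (show ¬ ((num == 0 && false) = true) by simp)]
          exact ihc

theorem dict_nil_eq : PySem.Dict.empty = PySem.Dict.mk ([] : List (Int × Int)) := rfl

-- ===== VERDICT (by name: the statement is the Claim_ definition above) =====
theorem find_patches_spec : Claim_equal_find_patches := by
  intro nums _
  unfold Spec_find_patches find_patches find_patches_alt
  by_cases hnil : nums = []
  · subst hnil; rfl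
  · rw [if_neg hnil]
    have := loop_eq nums 0 [] [] (-1) (by simp)
    rw [if_neg (by decide : ¬ (1:Int) ∈ ([] : List Int))] at this
    rw [dict_nil_eq, this]
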